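-- pv_equiv track=rewrite | github.com/Shreyash54/learnpython | Leetcode/prob7.py | maxWeight
-- ===== SOURCE A (Python) =====
-- import heapq
--
-- def maxWeight(pizzas):
--     res = 0
--     # Create a max-heap by negating the pizza weights
--     max_heap = [-num for num in pizzas]
--     heapq.heapify(max_heap)  # Convert list to a heap
--
--     size = len(pizzas) // 4
--     odd = (size + 1) // 2  # Calculate number of odd days
--
--     # First, process the odd days: take the heaviest pizza each time
--     for _ in range(odd):
--         res += -heapq.heappop(max_heap)  # Pop the largest (negated back to positive)
--
--     # Then, process the even days: remove one pizza and take the second heaviest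
--     for _ in range(size - odd):
--         heapq.heappop(max_heap)  # Remove one pizza
--         res += -heapq.heappop(max_heap)  # Pop the second heaviest (negated back to positive)
--
--     return res
-- ===== SOURCE B (Python) =====
-- def maxWeight(pizzas):
--     size = len(pizzas) // 4
--     odd = (size + 1) // 2
--     arr = sorted(pizzas, reverse=True)
--     return sum(arr[:odd]) + sum(arr[odd + 2 * k + 1] for k in range(size - odd))
-- ===== Notes on version B (the rewrite author's own statement) =====
-- stated objective: faster
-- what changed: Replaces the negated max-heap with repeated heappops by one descending sort plus direct index arithmetic (odd days are the prefix arr[:odd], even days the positions arr[odd+2k+1]); the C-level sort beats the per-pop heap sifting in Python by a constant factor.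
import Mathlib
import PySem

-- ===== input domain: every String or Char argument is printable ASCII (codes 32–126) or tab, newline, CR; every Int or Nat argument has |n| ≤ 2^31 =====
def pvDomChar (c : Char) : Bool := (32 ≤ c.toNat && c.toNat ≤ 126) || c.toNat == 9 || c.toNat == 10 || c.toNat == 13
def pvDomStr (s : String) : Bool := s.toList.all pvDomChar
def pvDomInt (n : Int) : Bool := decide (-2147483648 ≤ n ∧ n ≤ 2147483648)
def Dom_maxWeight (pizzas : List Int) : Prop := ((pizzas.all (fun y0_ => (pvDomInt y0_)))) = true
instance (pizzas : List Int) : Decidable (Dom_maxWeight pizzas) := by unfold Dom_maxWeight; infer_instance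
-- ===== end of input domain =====

-- B changes the data structure: one descending sort with index arithmetic instead of A's negated heap with repeated pops; same values, no mutable heap state.

-- ===== PORT A =====
-- heapq.heappop returns the minimum of the heap; ported as extraction of the first
-- minimal element (PySem.List.min?) — exact on the popped VALUES, which is all A uses.
-- The 'none' branch (empty heap) is unreachable: A never pops more than len(pizzas) times.
def pvPopMin (h : List Int) : Int × List Int :=
  match PySem.List.min? h (fun x => x) with
  | some m => (m, h.erase m)
  | none => (0, h)

-- for _ in range(odd): res += -heappop(max_heap)
def pvLoopOdd : Nat → Int → List Int → Int × List Int
  | 0, res, h => (res, h)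
  | k+1, res, h =>
      let p := pvPopMin h
      pvLoopOdd k (res + (-p.1)) p.2

-- for _ in range(size - odd): heappop(max_heap); res += -heappop(max_heap)
def pvLoopEven : Nat → Int → List Int → Int
  | 0, res, _ => res
  | k+1, res, h =>
      let p1 := pvPopMin h
      let p2 := pvPopMin p1.2
      pvLoopEven k (res + (-p2.1)) p2.2

def maxWeight (pizzas : List Int) : Int :=
  let maxHeap := pizzas.map (fun num => -num)
  let size := PySem.Int.floordiv (pizzas.length : Int) 4
  let odd := PySem.Int.floordiv (size + 1) 2
  let r1 := pvLoopOdd odd.toNat 0 maxHeap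
  pvLoopEven (size - odd).toNat r1.1 r1.2

-- ===== PORT B =====
def maxWeight_alt (pizzas : List Int) : Int :=
  let size := PySem.Int.floordiv (pizzas.length : Int) 4
  let odd := PySem.Int.floordiv (size + 1) 2
  let arr := PySem.List.sorted pizzas (fun x => x) true
  (PySem.List.slice arr none (some odd)).sum
    + ((PySem.List.pyRange 0 (size - odd) 1).map
        (fun k => PySem.List.pyGetD arr (odd + 2 * k + 1) 0)).sum

-- ===== PRECONDITION & SPEC =====
def Spec_maxWeight (pizzas : List Int) (out : Int) : Prop := out = maxWeight_alt pizzas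
instance (pizzas : List Int) (out : Int) : Decidable (Spec_maxWeight pizzas out) := by unfold Spec_maxWeight; infer_instance

-- ===== CLAIM (what is proved, stated in full; the proofs are below) =====
def Claim_equal_maxWeight : Prop := ∀ (pizzas : List Int), Dom_maxWeight pizzas → Spec_maxWeight pizzas (maxWeight pizzas)

-- ===== LEMMAS AND PROOFS =====

-- sum of the elements at odd positions among the first 2*k elements
def pvOddSel : Nat → List Int → Int
  | 0, _ => 0
  | k+1, _ :: b :: u => b + pvOddSel k u
  | _+1, _ => 0

-- popping from a heap h that is a permutation of a sorted (ascending) list x :: rest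
lemma pvPopMin_spec (h : List Int) (x : Int) (rest : List Int)
    (hp : h.Perm (x :: rest)) (hs : (x :: rest).Pairwise (· ≤ ·)) :
    (pvPopMin h).1 = x ∧ (pvPopMin h).2.Perm rest := by
  have hne : h ≠ [] := by
    intro h0; subst h0; exact (List.cons_ne_nil x rest) hp.nil_eq.symm
  obtain ⟨m, hm⟩ : ∃ m, PySem.List.min? h (fun x => x) = some m := by
    cases hmm : PySem.List.min? h (fun x => x) with
    | none => exact absurd ((PySem.List.min?_eq_none_iff _ _).1 hmm) hne
    | some m => exact ⟨m, rfl⟩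
  have hmem : m ∈ h := PySem.List.min?_mem hm
  have hmin : ∀ y ∈ h, m ≤ y := fun y hy => PySem.List.min?_isMin hm y hy
  have hxh : x ∈ h := hp.mem_iff.2 (List.mem_cons_self)
  have hmt : m ∈ x :: rest := hp.mem_iff.1 hmem
  have hxle : ∀ y ∈ rest, x ≤ y := by
    intro y hy; exact (List.pairwise_cons.1 hs).1 y hy
  have hmx : m = x := by
    rcases List.mem_cons.1 hmt with h1 | h1
    · exact h1
    · exact le_antisymm (hmin x hxh) (hxle m h1)
  subst hmx
  refine ⟨by simp [pvPopMin, hm], ?_⟩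
  have := hp.erase m
  simpa [pvPopMin, hm, List.erase_cons_head] using this

lemma pvLoopOdd_spec (k : Nat) (t h : List Int) (res : Int)
    (hp : h.Perm t) (hs : t.Pairwise (· ≤ ·)) (hk : k ≤ t.length) :
    (pvLoopOdd k res h).1 = res - (t.take k).sum ∧ (pvLoopOdd k res h).2.Perm (t.drop k) := by
  induction k generalizing t h res with
  | zero => simpa [pvLoopOdd] using hp
  | succ k ih =>
    match t with
    | [] => simp at hk
    | x :: rest =>
      obtain ⟨h1, h2⟩ := pvPopMin_spec h x rest hp hs
      have hs' := (List.pairwise_cons.1 hs).2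
      have := ih rest (pvPopMin h).2 (res + (-x)) h2 hs' (by simpa using hk)
      simp only [pvLoopOdd, h1]
      refine ⟨?_, this.2⟩
      rw [this.1]; simp; ring

lemma pvLoopEven_spec (k : Nat) (t h : List Int) (res : Int)
    (hp : h.Perm t) (hs : t.Pairwise (· ≤ ·)) (hk : 2 * k ≤ t.length) :
    pvLoopEven k res h = res - pvOddSel k t := by
  induction k generalizing t h res with
  | zero => simp [pvLoopEven, pvOddSel]
  | succ k ih =>
    match t with
    | [] => simp at hk
    | [x] => simp at hk; omega
    | x :: y :: rest =>
      obtain ⟨h1, h2⟩ := pvPopMin_spec h x (y :: rest) hp hs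
      have hs1 := (List.pairwise_cons.1 hs).2
      obtain ⟨g1, g2⟩ := pvPopMin_spec (pvPopMin h).2 y rest h2 hs1
      have hs2 := (List.pairwise_cons.1 hs1).2
      have := ih rest (pvPopMin (pvPopMin h).2).2 (res + (-y)) g2 hs2 (by simp at hk ⊢; omega)
      simp only [pvLoopEven, g1]
      rw [this]; simp [pvOddSel]; ring

lemma pvOddSel_getD (k : Nat) (u : List Int) (hk : 2 * k ≤ u.length) :
    pvOddSel k u = ((List.range k).map (fun i => u.getD (2 * i + 1) 0)).sum := by
  induction k generalizing u with
  | zero => simp [pvOddSel]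
  | succ k ih =>
    match u with
    | [] => simp at hk
    | [x] => simp at hk; omega
    | x :: y :: rest =>
      rw [List.range_succ_eq_map]
      simp only [List.map_cons, List.map_map, List.sum_cons]
      have : ((List.range k).map ((fun i => (x :: y :: rest).getD (2 * i + 1) 0) ∘ (· + 1))) =
          ((List.range k).map (fun i => rest.getD (2 * i + 1) 0)) := by
        apply List.map_congr_left
        intro i _
        simp only [Function.comp_apply]
        have e : 2 * (i + 1) + 1 = 2 * i + 1 + 1 + 1 := by ring
        rw [e, List.getD_cons_succ, List.getD_cons_succ]
      rw [this, pvOddSel, ih rest (by simp at hk ⊢; omega)]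
      simp

lemma pvGetD_map_neg (l : List Int) (j : Nat) :
    (l.map (fun x => -x)).getD j 0 = -(l.getD j 0) := by
  induction l generalizing j with
  | nil => simp
  | cons a l ih =>
    cases j with
    | zero => simp
    | succ n => cases h : l[n]? <;> simp [List.getD, h]

lemma pvSum_map_neg (l : List Int) : (l.map (fun x => -x)).sum = -l.sum := by
  induction l with | nil => simp | cons a l ih => simp [ih]; ring

-- ===== VERDICT (by name: the statement is the Claim_ definition above) =====
lemma pvGetD_drop (l : List Int) (n m : Nat) :
    (l.drop n).getD m 0 = l.getD (n + m) 0 := by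
  simp [List.getD, List.getElem?_drop]

lemma pvMain (pizzas : List Int) : maxWeight pizzas = maxWeight_alt pizzas := by
  unfold maxWeight maxWeight_alt
  dsimp only
  have h4 : PySem.Int.floordiv ((pizzas.length : Nat) : Int) 4 = (pizzas.length : Int) / 4 :=
    PySem.Int.floordiv_eq_ediv_of_pos (by omega)
  set N : Int := ((pizzas.length : Nat) : Int) with hN
  set size : Int := PySem.Int.floordiv N 4 with hsizedef
  have h2 : PySem.Int.floordiv (size + 1) 2 = (size + 1) / 2 :=
    PySem.Int.floordiv_eq_ediv_of_pos (by omega)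
  set odd : Int := PySem.Int.floordiv (size + 1) 2 with hodddef
  have h0N : 0 ≤ N := by rw [hN]; omega
  have hNlen : N = (pizzas.length : Int) := hN
  have hodd0 : 0 ≤ odd := by omega
  set arr := PySem.List.sorted pizzas (fun x => x) true with harr
  set t := arr.map (fun x => -x) with ht
  have hlen_arr : arr.length = pizzas.length := by
    rw [harr]; exact PySem.List.length_sorted pizzas (fun x => x) true
  have hlt : t.length = pizzas.length := by rw [ht]; simp [hlen_arr]
  have hperm : (pizzas.map (fun num => -num)).Perm t := by
    rw [ht]
    exact (((PySem.List.sorted_perm pizzas (fun x => x) true).map (fun x => -x))).symm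
  have hpair_arr : arr.Pairwise (fun a b => b ≤ a) := by
    rw [harr]
    simpa using PySem.List.sorted_pairwise_rev pizzas (fun x => x)
  have hpairt : t.Pairwise (· ≤ ·) := by
    rw [ht]
    exact List.Pairwise.map _ (fun a b (h : b ≤ a) => by omega) hpair_arr
  have hoddle : odd.toNat ≤ t.length := by rw [hlt]; omega
  obtain ⟨hO1, hO2⟩ :=
    pvLoopOdd_spec odd.toNat t (pizzas.map (fun num => -num)) 0 hperm hpairt hoddle
  have hklen : 2 * (size - odd).toNat ≤ (t.drop odd.toNat).length := by
    rw [List.length_drop, hlt]; omega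
  have hE := pvLoopEven_spec (size - odd).toNat (t.drop odd.toNat)
      (pvLoopOdd odd.toNat 0 (pizzas.map (fun num => -num))).2
      (pvLoopOdd odd.toNat 0 (pizzas.map (fun num => -num))).1
      hO2 hpairt.drop hklen
  rw [hE, hO1]
  rw [pvOddSel_getD _ _ hklen]
  have htake : t.take odd.toNat = (arr.take odd.toNat).map (fun x => -x) := by
    rw [ht, List.map_take]
  have hdrop : t.drop odd.toNat = (arr.drop odd.toNat).map (fun x => -x) := by
    rw [ht, List.map_drop]
  rw [htake, pvSum_map_neg]
  have hsel : ((List.range (size - odd).toNat).map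
        (fun i => (t.drop odd.toNat).getD (2 * i + 1) 0)).sum
      = -(((List.range (size - odd).toNat).map
        (fun i => arr.getD (odd.toNat + (2 * i + 1)) 0)).sum) := by
    rw [← pvSum_map_neg, List.map_map]
    congr 1
    apply List.map_congr_left
    intro i _
    simp only [Function.comp_apply]
    rw [hdrop, pvGetD_map_neg, pvGetD_drop]
  rw [hsel]
  have hslice : PySem.List.slice arr none (some odd) = arr.take odd.toNat :=
    PySem.List.slice_to arr hodd0
  rw [hslice]
  have hrange : PySem.List.pyRange 0 (size - odd) 1
      = (List.range ((size - odd) - 0).toNat).map (fun k : Nat => (0 : Int) + k) :=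
    PySem.List.pyRange_one 0 (size - odd)
  rw [hrange, List.map_map]
  have hterm : ((List.range ((size - odd) - 0).toNat).map
        ((fun k => PySem.List.pyGetD arr (odd + 2 * k + 1) 0) ∘ (fun k : Nat => (0 : Int) + k)))
      = (List.range (size - odd).toNat).map
        (fun i => arr.getD (odd.toNat + (2 * i + 1)) 0) := by
    have : (size - odd) - 0 = size - odd := by ring
    rw [this]
    apply List.map_congr_left
    intro i _
    simp only [Function.comp_apply]
    have hidx : odd + 2 * ((0 : Int) + (i : Nat)) + 1 = ((odd.toNat + (2 * i + 1) : Nat) : Int) := by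
      push_cast
      omega
    rw [hidx, PySem.List.pyGetD_natCast]
  rw [hterm]
  ring

theorem maxWeight_spec : Claim_equal_maxWeight := by
  intro pizzas _
  exact pvMain pizzas
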